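-- pv_equiv track=rewrite | github.com/aarongilchrist/advent-of-code-solutions | 2023/22/sand-slabs-part-1.py | intersecting_xy
-- ===== SOURCE A (Python) =====
-- import itertools
--
-- bricks_xy = lambda brick_ranges: {k:set(itertools.product(range(brick_range[0][0],brick_range[0][1]+1),range(brick_range[1][0],brick_range[1][1]+1))) for k,brick_range in brick_ranges.items()}
--
-- def intersecting_xy(brick_ranges):
--     horizontal_coords = bricks_xy(brick_ranges)
--     xy_dict = {}
--     for m in brick_ranges.keys():
--         xy_ints = []
--         for n in brick_ranges.keys():
--             if horizontal_coords[m].intersection(horizontal_coords[n]) != set():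
--                 xy_ints.append(n)
--         xy_dict.update({m:set(xy_ints)})
--     return xy_dict
-- ===== SOURCE B (Python) =====
-- def intersecting_xy(brick_ranges):
--     spans = [(k, r[0][0], r[0][1], r[1][0], r[1][1]) for k, r in brick_ranges.items()]
--     return {m: {n for n, bx1, bx2, by1, by2 in spans
--                 if (bx1 if ax1 < bx1 else ax1) <= (bx2 if bx2 < ax2 else ax2)
--                 and (by1 if ay1 < by1 else ay1) <= (by2 if by2 < ay2 else ay2)}
--             for m, ax1, ax2, ay1, ay2 in spans}
-- ===== Notes on version B (the rewrite author's own statement) =====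
-- stated objective: faster
-- what changed: B replaces A's materialised per-brick XY coordinate sets and pairwise set intersections by a constant-time interval-overlap test per brick pair (greater low end at most the smaller high end on each axis), so no footprint sets are ever built.
import Mathlib
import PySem

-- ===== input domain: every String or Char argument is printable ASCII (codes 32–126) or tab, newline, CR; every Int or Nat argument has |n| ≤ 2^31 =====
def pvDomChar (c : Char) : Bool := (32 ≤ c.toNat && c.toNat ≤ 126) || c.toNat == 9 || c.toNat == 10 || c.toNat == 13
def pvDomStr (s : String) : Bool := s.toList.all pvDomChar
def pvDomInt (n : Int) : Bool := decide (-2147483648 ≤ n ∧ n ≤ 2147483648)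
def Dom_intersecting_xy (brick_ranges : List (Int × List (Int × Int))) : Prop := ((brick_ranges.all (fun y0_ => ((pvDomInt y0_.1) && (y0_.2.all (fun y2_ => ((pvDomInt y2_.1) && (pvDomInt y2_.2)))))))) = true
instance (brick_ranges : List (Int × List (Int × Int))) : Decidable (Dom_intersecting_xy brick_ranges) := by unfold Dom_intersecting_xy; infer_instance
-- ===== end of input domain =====

-- B replaces A's materialised per-brick coordinate sets and pairwise set intersections by a
-- closed-form interval-overlap test per pair (objective: faster — no footprint sets are built).

-- ===== PORT A =====
-- bricks_xy's per-brick set: set(itertools.product(range(x1, x2+1), range(y1, y2+1))).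
-- The product of two ranges is duplicate-free, so the set's element list IS the product list
-- (PySem.Set.ofList is the identity on Nodup lists); it is built directly so that evaluating
-- the port stays linear in the footprint instead of quadratic in the dedup scan.
def pvFootprint (br : List (Int × Int)) : PySem.Set (Int × Int) :=
  match PySem.List.pyGet? br 0, PySem.List.pyGet? br 1 with
  | some xr, some yr =>
      (PySem.List.pyRange xr.1 (xr.2 + 1) 1).flatMap
        (fun x => (PySem.List.pyRange yr.1 (yr.2 + 1) 1).map (fun y => (x, y)))
  | _, _ => PySem.Set.empty   -- unreachable under Pre_ (brick_range[0]/[1] would raise IndexError)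

def pvBricksXY (d : PySem.Dict Int (List (Int × Int))) : PySem.Dict Int (PySem.Set (Int × Int)) :=
  d.items.foldl (fun h p => h.insert p.1 (pvFootprint p.2)) PySem.Dict.empty

-- A's test that the intersection of two footprints is nonempty holds exactly when some
-- element of the first footprint lies in the second
-- (PySem.Set.mem_inter); it is ported as a short-circuiting scan so that evaluating the
-- port does not materialise the intersection list. Same truth value on every input.
def intersecting_xy (brick_ranges : List (Int × List (Int × Int))) : List (Int × List Int) :=
  let d := PySem.Dict.ofList brick_ranges
  let horizontal_coords := pvBricksXY d
  let xy_dict := d.keys.foldl (fun acc m =>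
    let xy_ints := d.keys.foldl (fun l n =>
      if (horizontal_coords.getD m PySem.Set.empty).any
           (fun c => (horizontal_coords.getD n PySem.Set.empty).contains c)
      then l ++ [n] else l) ([] : List Int)
    acc.insert m (PySem.Set.ofList xy_ints)) (PySem.Dict.empty : PySem.Dict Int (List Int))
  xy_dict.items

-- ===== PORT B =====
def pvSpan (br : List (Int × Int)) : Int × Int × Int × Int :=
  match PySem.List.pyGet? br 0, PySem.List.pyGet? br 1 with
  | some xr, some yr => (xr.1, xr.2, yr.1, yr.2)
  | _, _ => (0, -1, 0, -1)   -- unreachable under Pre_ (r[0]/r[1] would raise IndexError)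

-- '(bx1 if ax1 < bx1 else ax1) <= (bx2 if bx2 < ax2 else ax2)' is max ≤ min on each axis
def pvOverlaps (a b : Int × Int × Int × Int) : Bool :=
  decide (max a.1 b.1 ≤ min a.2.1 b.2.1) && decide (max a.2.2.1 b.2.2.1 ≤ min a.2.2.2 b.2.2.2)

def intersecting_xy_alt (brick_ranges : List (Int × List (Int × Int))) : List (Int × List Int) :=
  let spans := (PySem.Dict.ofList brick_ranges).items.map (fun p => (p.1, pvSpan p.2))
  spans.map (fun q =>
    (q.1, PySem.Set.ofList ((spans.filter (fun r => pvOverlaps q.2 r.2)).map (fun r => r.1))))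

-- ===== PRECONDITION & SPEC =====
-- Pre_ excludes only inputs on which A raises IndexError: some brick's range list has
-- fewer than two coordinate pairs, so brick_range[0] or brick_range[1] fails.
def Pre_intersecting_xy (brick_ranges : List (Int × List (Int × Int))) : Prop :=
  ∀ p ∈ brick_ranges, 2 ≤ p.2.length
instance (brick_ranges : List (Int × List (Int × Int))) : Decidable (Pre_intersecting_xy brick_ranges) := by unfold Pre_intersecting_xy; infer_instance

def pvWitness_intersecting_xy : (List (Int × List (Int × Int))) :=
  [(1, [(0, 1), (0, 1), (0, 0)]), (2, [(1, 2), (1, 1), (5, 6)]), (3, [(3, 4), (0, 0), (1, 1)])]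

def Spec_intersecting_xy (brick_ranges : List (Int × List (Int × Int))) (out : List (Int × List Int)) : Prop := out = intersecting_xy_alt brick_ranges
instance (brick_ranges : List (Int × List (Int × Int))) (out : List (Int × List Int)) : Decidable (Spec_intersecting_xy brick_ranges out) := by unfold Spec_intersecting_xy; infer_instance

-- ===== CLAIM (what is proved, stated in full; the proofs are below) =====
def Claim_equal_intersecting_xy : Prop := ∀ (brick_ranges : List (Int × List (Int × Int))), Dom_intersecting_xy brick_ranges → Pre_intersecting_xy brick_ranges → Spec_intersecting_xy brick_ranges (intersecting_xy brick_ranges)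

-- ===== LEMMAS AND PROOFS =====

-- every item of Dict.ofList l is a pair of l
theorem pv_items_foldl_sub {κ ν : Type} [BEq κ] [LawfulBEq κ]
    (l : List (κ × ν)) (d : PySem.Dict κ ν) (q : κ × ν)
    (h : q ∈ (l.foldl (fun h p => h.insert p.1 p.2) d).items) :
    q ∈ d.items ∨ q ∈ l := by
  induction l generalizing d with
  | nil => exact Or.inl h
  | cons p rest ih =>
    rcases ih (d.insert p.1 p.2) h with h' | h'
    · rcases (PySem.Dict.mem_items_insert _ _ _ _).1 h' with rfl | ⟨h2, _⟩
      · exact Or.inr (by simp)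
      · exact Or.inl h2
    · exact Or.inr (List.mem_cons_of_mem _ h')

theorem pv_items_ofList_sub (l : List (Int × List (Int × Int))) (q : Int × List (Int × Int))
    (h : q ∈ (PySem.Dict.ofList l).items) : q ∈ l := by
  rcases pv_items_foldl_sub l PySem.Dict.empty q h with h' | h'
  · simp [PySem.Dict.empty] at h'
  · exact h'

-- the core pointwise fact: some cell of brm's footprint lies in brn's iff the interval pairs overlap
theorem pv_core (brm brn : List (Int × Int)) (hm : 2 ≤ brm.length) (hn : 2 ≤ brn.length) :
    ((pvFootprint brm).any (fun c => (pvFootprint brn).contains c))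
      = pvOverlaps (pvSpan brm) (pvSpan brn) := by
  match brm, brn with
  | am :: bm :: tm, an :: bn :: tn =>
    have h0m : (0:Int) ≤ (tm.length : Int) + 1 := by positivity
    have h0n : (0:Int) ≤ (tn.length : Int) + 1 := by positivity
    have hfm : pvFootprint (am :: bm :: tm) =
        (PySem.List.pyRange am.1 (am.2 + 1) 1).flatMap
          (fun x => (PySem.List.pyRange bm.1 (bm.2 + 1) 1).map (fun y => (x, y))) := by
      simp [pvFootprint, PySem.List.pyGet?, PySem.List.pyIdx?, h0m]
    have hfn : pvFootprint (an :: bn :: tn) =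
        (PySem.List.pyRange an.1 (an.2 + 1) 1).flatMap
          (fun x => (PySem.List.pyRange bn.1 (bn.2 + 1) 1).map (fun y => (x, y))) := by
      simp [pvFootprint, PySem.List.pyGet?, PySem.List.pyIdx?, h0n]
    have hsm : pvSpan (am :: bm :: tm) = (am.1, am.2, bm.1, bm.2) := by
      simp [pvSpan, PySem.List.pyGet?, PySem.List.pyIdx?, h0m]
    have hsn : pvSpan (an :: bn :: tn) = (an.1, an.2, bn.1, bn.2) := by
      simp [pvSpan, PySem.List.pyGet?, PySem.List.pyIdx?, h0n]
    rw [hfm, hfn, hsm, hsn]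
    rw [Bool.eq_iff_iff]
    simp only [List.any_eq_true, PySem.Set.contains_iff, pvOverlaps, Bool.and_eq_true,
      decide_eq_true_eq, List.mem_flatMap, List.mem_map]
    constructor
    · rintro ⟨c, ⟨x1, hx1, y1, hy1, hc1⟩, x2, hx2, y2, hy2, hc2⟩
      rw [PySem.List.mem_pyRange_one] at hx1 hy1 hx2 hy2
      rw [← hc1, Prod.ext_iff] at hc2
      simp only at hc2
      obtain ⟨e1, e2⟩ := hc2
      constructor <;> simp only [max_le_iff, le_min_iff] <;> omega
    · rintro ⟨h1, h2⟩
      simp only [max_le_iff, le_min_iff] at h1 h2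
      refine ⟨(max am.1 an.1, max bm.1 bn.1),
        ⟨max am.1 an.1, by rw [PySem.List.mem_pyRange_one]; omega,
         max bm.1 bn.1, by rw [PySem.List.mem_pyRange_one]; omega, rfl⟩,
        max am.1 an.1, by rw [PySem.List.mem_pyRange_one]; omega,
        max bm.1 bn.1, by rw [PySem.List.mem_pyRange_one]; omega, rfl⟩

-- the two programs agree on any dict whose range lists all have length ≥ 2
theorem pv_main (d : PySem.Dict Int (List (Int × Int)))
    (hknd : d.keys.Nodup)
    (hpre : ∀ p ∈ d.items, 2 ≤ p.2.length) :
    (d.keys.foldl (fun acc m =>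
      acc.insert m (PySem.Set.ofList (d.keys.foldl (fun l n =>
        if ((pvBricksXY d).getD m PySem.Set.empty).any
            (fun c => ((pvBricksXY d).getD n PySem.Set.empty).contains c)
        then l ++ [n] else l) ([] : List Int))))
      (PySem.Dict.empty : PySem.Dict Int (List Int))).items
    = (d.items.map (fun p => (p.1, pvSpan p.2))).map (fun q =>
        (q.1, PySem.Set.ofList (((d.items.map (fun p => (p.1, pvSpan p.2))).filter
          (fun r => pvOverlaps q.2 r.2)).map (fun r => r.1)))) := by
  have hind : (d.items.map (fun p => p.1)).Nodup := hknd
  have hhc : (pvBricksXY d).items = d.items.map (fun p => (p.1, pvFootprint p.2)) := by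
    unfold pvBricksXY
    exact PySem.Dict.items_foldl_insert_fresh d.items (fun p => p.1) (fun p => pvFootprint p.2)
      PySem.Dict.empty (fun a _ => PySem.Dict.contains_empty (ν := PySem.Set (Int × Int)) a) hind
  have hhckeys : (pvBricksXY d).keys = d.keys := by
    show (pvBricksXY d).items.map (fun p => p.1) = d.items.map (fun p => p.1)
    rw [hhc, List.map_map]
    rfl
  have hget : ∀ br m, (m, br) ∈ d.items →
      (pvBricksXY d).getD m PySem.Set.empty = pvFootprint br := by
    intro br m hmem
    refine PySem.Dict.getD_of_mem_items _ ?_ ?_ _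
    · rw [hhc]; exact List.mem_map_of_mem hmem
    · rw [hhckeys]; exact hknd
  have houter := PySem.Dict.items_foldl_insert_fresh d.keys (fun m => m)
      (fun m => PySem.Set.ofList (d.keys.foldl (fun l n =>
        if ((pvBricksXY d).getD m PySem.Set.empty).any
            (fun c => ((pvBricksXY d).getD n PySem.Set.empty).contains c)
        then l ++ [n] else l) ([] : List Int)))
      (PySem.Dict.empty : PySem.Dict Int (List Int))
      (fun a _ => PySem.Dict.contains_empty (ν := List Int) a) (by simpa using hknd)
  have hemp : (PySem.Dict.empty : PySem.Dict Int (List Int)).items = ([] : List (Int × List Int)) := rfl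
  rw [houter, hemp, List.nil_append]
  -- both sides are maps over d.items
  have hkeys : d.keys = d.items.map (fun p => p.1) := rfl
  rw [hkeys, List.map_map, List.map_map]
  apply List.map_congr_left
  intro pm hpm
  simp only [Function.comp_apply]
  have hlm : 2 ≤ pm.2.length := hpre _ hpm
  have hhcm := hget pm.2 pm.1 (by exact hpm)
  refine Prod.ext rfl ?_
  show PySem.Set.ofList _ = PySem.Set.ofList _
  congr 1
  rw [PySem.List.foldl_append_if_eq_filter, List.nil_append, List.filter_map,
      List.filter_map, List.map_map]
  show (d.items.filter _).map (fun p => p.1) = (d.items.filter _).map (fun p => p.1)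
  congr 1
  apply List.filter_congr
  intro qn hqn
  have hln : 2 ≤ qn.2.length := hpre _ hqn
  have hhcn := hget qn.2 qn.1 hqn
  simp only [Function.comp_apply]
  rw [hhcm, hhcn]
  exact pv_core pm.2 qn.2 hlm hln

-- ===== VERDICT (by name: the statement is the Claim_ definition above) =====
theorem intersecting_xy_spec : Claim_equal_intersecting_xy := by
  intro brick_ranges _ hpre
  show intersecting_xy brick_ranges = intersecting_xy_alt brick_ranges
  unfold intersecting_xy intersecting_xy_alt
  exact pv_main (PySem.Dict.ofList brick_ranges)
    (PySem.Dict.nodup_keys_ofList brick_ranges)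
    (fun p hp => hpre p (pv_items_ofList_sub _ _ hp))
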